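-- pv_equiv track=rewrite | github.com/pypi-data/pypi-mirror-358 | packages/universal-document-mcp/universal_document_mcp-1.0.0.tar.gz/universal_document_mcp-1.0.0/scripts/enhanced_universal_document_converter.py | shorten_label
-- ===== SOURCE A (Python) =====
-- def shorten_label(label: str) -> str:
--     """Intelligently shorten long labels while preserving meaning"""
--     # Common abbreviations for technical terms
--     abbreviations = {
--         "Architecture": "Arch",
--         "Cognitive": "Cog",
--         "Differentiable": "Diff",
--         "Optimization": "Opt",
--         "Processing": "Process",
--         "Framework": "FW",
--         "Algorithm": "Algo",
--         "Implementation": "Impl",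
--         "Configuration": "Config",
--         "Management": "Mgmt",
--         "Development": "Dev",
--         "Application": "App",
--         "Interface": "IF",
--         "Component": "Comp"
--     }
--
--     shortened = label
--     for full, abbrev in abbreviations.items():
--         shortened = shortened.replace(full, abbrev)
--
--     # If still too long, truncate intelligently
--     if len(shortened) > 25:
--         words = shortened.split()
--         if len(words) > 2:
--             shortened = f"{words[0]} {words[1]}..."
--         elif len(shortened) > 30:
--             shortened = shortened[:27] + "..."
--
--     return shortened
-- ===== SOURCE B (Python) =====
-- def shorten_label(label: str) -> str:
--     """Intelligently shorten long labels while preserving meaning (single-pass rewrite)."""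
--     # Same table, same order; scanned once instead of 14 cascaded str.replace passes.
--     abbreviations = [
--         ("Architecture", "Arch"),
--         ("Cognitive", "Cog"),
--         ("Differentiable", "Diff"),
--         ("Optimization", "Opt"),
--         ("Processing", "Process"),
--         ("Framework", "FW"),
--         ("Algorithm", "Algo"),
--         ("Implementation", "Impl"),
--         ("Configuration", "Config"),
--         ("Management", "Mgmt"),
--         ("Development", "Dev"),
--         ("Application", "App"),
--         ("Interface", "IF"),
--         ("Component", "Comp"),
--     ]
--
--     out = []
--     i = 0
--     n = len(label)
--     while i < n:
--         for full, abbrev in abbreviations: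
--             if label.startswith(full, i):
--                 out.append(abbrev)
--                 i += len(full)
--                 break
--         else:
--             out.append(label[i])
--             i += 1
--     shortened = "".join(out)
--
--     # If still too long, truncate intelligently
--     if len(shortened) > 25:
--         words = shortened.split()
--         if len(words) > 2:
--             shortened = f"{words[0]} {words[1]}..."
--         elif len(shortened) > 30:
--             shortened = shortened[:27] + "..."
--
--     return shortened
-- ===== Notes on version B (the rewrite author's own statement) =====
-- stated objective: alternative
-- what changed: Replaces the cascade of 14 full-string str.replace passes with a single left-to-right scan that matches the abbreviation table at each position (safe because the capitalized keys cannot overlap and no replacement value can create or destroy a later match), keeping the truncation block unchanged.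
import Mathlib
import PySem

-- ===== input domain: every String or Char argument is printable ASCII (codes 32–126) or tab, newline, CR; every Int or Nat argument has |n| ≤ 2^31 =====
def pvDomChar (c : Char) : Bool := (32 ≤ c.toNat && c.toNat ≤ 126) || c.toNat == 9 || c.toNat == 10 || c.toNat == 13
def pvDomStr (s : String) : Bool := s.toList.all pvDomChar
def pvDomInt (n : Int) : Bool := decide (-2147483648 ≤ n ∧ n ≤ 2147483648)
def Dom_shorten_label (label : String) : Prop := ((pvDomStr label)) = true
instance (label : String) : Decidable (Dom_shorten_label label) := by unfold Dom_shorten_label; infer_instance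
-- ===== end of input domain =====

-- B replaces A's cascade of 14 full-string str.replace passes by one left-to-right scan of the
-- label matching the same abbreviation table at each position (objective: alternative, same cost).

-- ===== PORT A =====
-- the dict of abbreviations, in insertion order
def pyAbbrev : List (String × String) :=
  [("Architecture", "Arch"), ("Cognitive", "Cog"), ("Differentiable", "Diff"),
   ("Optimization", "Opt"), ("Processing", "Process"), ("Framework", "FW"),
   ("Algorithm", "Algo"), ("Implementation", "Impl"), ("Configuration", "Config"),
   ("Management", "Mgmt"), ("Development", "Dev"), ("Application", "App"),
   ("Interface", "IF"), ("Component", "Comp")]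

def shorten_label (label : String) : String :=
  -- for full, abbrev in abbreviations.items(): shortened = shortened.replace(full, abbrev)
  let shortened := pyAbbrev.foldl (fun acc p => PySem.Str.replace acc p.1 p.2) label
  if PySem.Str.len shortened > 25 then
    let words := PySem.Str.split₀ shortened
    if words.length > 2 then
      -- f"{words[0]} {words[1]}..."  (indices in range: the guard gives words.length > 2)
      ((PySem.List.pyGet? words 0).getD "" ++ " " ++ (PySem.List.pyGet? words 1).getD "") ++ "..."
    else if PySem.Str.len shortened > 30 then
      PySem.Str.slice shortened none (some 27) ++ "..."
    else shortened
  else shortened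

-- ===== PORT B =====
-- the same table as an ordered list of (full, abbrev) char lists
def pvPairs : List (List Char × List Char) :=
  [("Architecture".toList, "Arch".toList), ("Cognitive".toList, "Cog".toList),
   ("Differentiable".toList, "Diff".toList), ("Optimization".toList, "Opt".toList),
   ("Processing".toList, "Process".toList), ("Framework".toList, "FW".toList),
   ("Algorithm".toList, "Algo".toList), ("Implementation".toList, "Impl".toList),
   ("Configuration".toList, "Config".toList), ("Management".toList, "Mgmt".toList),
   ("Development".toList, "Dev".toList), ("Application".toList, "App".toList),
   ("Interface".toList, "IF".toList), ("Component".toList, "Comp".toList)]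

-- the single left-to-right scan: at each position try the table in order (Source B's while/for loop;
-- the `!isEmpty` conjunct is a totality guard only — every key of pvPairs is nonempty)
def pvScan (ps : List (List Char × List Char)) (s : List Char) : List Char :=
  match s with
  | [] => []
  | c :: t =>
    match hf : ps.find? (fun p => p.1.isPrefixOf (c :: t) && !p.1.isEmpty) with
    | some q => q.2 ++ pvScan ps ((c :: t).drop q.1.length)
    | none => c :: pvScan ps t
termination_by s.length
decreasing_by
  · have hp := List.find?_some hf
    simp only [Bool.and_eq_true, List.isEmpty_eq_false_iff, Bool.not_eq_eq_eq_not,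
      Bool.not_true] at hp
    have : q.1.length ≠ 0 := by
      simpa [List.length_eq_zero_iff] using hp.2
    simp only [List.length_drop, List.length_cons]
    omega
  · simp

def shorten_label_alt (label : String) : String :=
  let shortened := String.ofList (pvScan pvPairs label.toList)
  if PySem.Str.len shortened > 25 then
    let words := PySem.Str.split₀ shortened
    if words.length > 2 then
      ((PySem.List.pyGet? words 0).getD "" ++ " " ++ (PySem.List.pyGet? words 1).getD "") ++ "..."
    else if PySem.Str.len shortened > 30 then
      PySem.Str.slice shortened none (some 27) ++ "..."
    else shortened
  else shortened

-- ===== PRECONDITION & SPEC =====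
def Spec_shorten_label (label : String) (out : String) : Prop := out = shorten_label_alt label
instance (label : String) (out : String) : Decidable (Spec_shorten_label label out) := by unfold Spec_shorten_label; infer_instance

-- ===== CLAIM (what is proved, stated in full; the proofs are below) =====
def Claim_equal_shorten_label : Prop := ∀ (label : String), Dom_shorten_label label → Spec_shorten_label label (shorten_label label)

-- ===== LEMMAS AND PROOFS =====

-- model of CPython str.replace for a nonempty pattern, in the direct recursive form
def pvRepl (k v : List Char) (s : List Char) : List Char :=
  match s with
  | [] => []
  | c :: t =>
    if k.isPrefixOf (c :: t) ∧ k ≠ [] then v ++ pvRepl k v ((c :: t).drop k.length)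
    else c :: pvRepl k v t
termination_by s.length
decreasing_by
  · rename_i h
    have : k.length ≠ 0 := by simpa [List.length_eq_zero_iff] using h.2
    simp only [List.length_drop, List.length_cons]
    omega
  · simp

theorem pvRepl_go (k v : List Char) (hk : k ≠ []) :
    ∀ (fuel : ℕ) (l acc : List Char), l.length ≤ fuel →
      PySem.Chars.replace.go k v fuel l acc = acc.reverse ++ pvRepl k v l := by
  intro fuel
  induction fuel with
  | zero =>
    intro l acc hl
    have : l = [] := by cases l <;> simp_all
    subst this
    rw [PySem.Chars.replace.go.eq_def]
    simp [pvRepl]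
  | succ n ih =>
    intro l acc hl
    cases l with
    | nil => rw [PySem.Chars.replace.go.eq_def]; simp [pvRepl]
    | cons c t =>
      rw [PySem.Chars.replace.go.eq_def]
      simp only []
      by_cases hp : k.isPrefixOf (c :: t)
      · have hklen : k.length ≠ 0 := by simpa [List.length_eq_zero_iff] using hk
        rw [if_pos hp]
        rw [ih ((c :: t).drop k.length) (v.reverse ++ acc)
            (by simp only [List.length_drop, List.length_cons] at *; omega)]
        rw [pvRepl]
        rw [if_pos ⟨hp, hk⟩]
        simp
      · rw [if_neg hp]
        rw [ih t (c :: acc) (by simp at hl ⊢; omega)]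
        rw [pvRepl]
        rw [if_neg (by simp [hp])]
        simp

theorem pvReplace_eq (k v s : List Char) (hk : k ≠ []) :
    PySem.Chars.replace s k v = pvRepl k v s := by
  rw [PySem.Chars.replace]
  rw [if_neg (by simpa [List.isEmpty_iff] using hk)]
  simpa using pvRepl_go k v hk s.length s [] le_rfl
-- character classes: the table's keys are Capital+lowercase words, values start with a capital
def pvUp (c : Char) : Bool := 65 ≤ c.toNat && c.toNat ≤ 90
def pvLow (c : Char) : Bool := 97 ≤ c.toNat && c.toNat ≤ 122

def pvBaseOK : List Char × List Char → Bool
  | (a :: tk, b :: _) => pvUp a && tk.all pvLow && pvUp b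
  | _ => false

-- separation of an earlier pair (k, v) from a later key k'
def pvSepOK (k v k' : List Char) : Bool :=
  !(k.isPrefixOf k') && !(k'.isPrefixOf k) &&
  (List.range v.length).all (fun p => !((v.drop p).isPrefixOf k') && !(k'.isPrefixOf (v.drop p)))

def pvGood : List (List Char × List Char) → Bool
  | [] => true
  | q :: ps => pvBaseOK q && ps.all (fun r => pvSepOK q.1 q.2 r.1) && pvGood ps

theorem pvUp_ne_low {a b : Char} (ha : pvUp a = true) (hb : pvLow b = true) : a ≠ b := by
  intro h; subst h; simp [pvUp, pvLow] at ha hb; omega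

theorem pvGood_base {ps : List (List Char × List Char)} (h : pvGood ps = true) :
    ∀ q ∈ ps, pvBaseOK q = true := by
  induction ps with
  | nil => simp
  | cons q ps ih =>
    simp only [pvGood, Bool.and_eq_true] at h
    intro r hr
    rcases List.mem_cons.mp hr with hr | hr
    · exact hr ▸ h.1.1
    · exact ih h.2 r hr
  
theorem pvGood_suffix {l₁ l₂ : List (List Char × List Char)} (h : pvGood (l₁ ++ l₂) = true) :
    pvGood l₂ = true := by
  induction l₁ with
  | nil => simpa using h
  | cons q l₁ ih =>
    simp only [List.cons_append, pvGood, Bool.and_eq_true] at h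
    exact ih h.2

theorem pvGood_sep {l₁ l₂ : List (List Char × List Char)} (h : pvGood (l₁ ++ l₂) = true) :
    ∀ a ∈ l₁, ∀ b ∈ l₂, pvSepOK a.1 a.2 b.1 = true := by
  induction l₁ with
  | nil => simp
  | cons q l₁ ih =>
    simp only [List.cons_append, pvGood, Bool.and_eq_true, List.all_eq_true] at h
    intro a ha b hb
    rcases List.mem_cons.mp ha with ha | ha
    · subst ha; exact h.1.2 b (by simp [hb])
    · exact ih h.2 a ha b hb

-- a word that cannot be a prefix of u and of which u is not a prefix is not a prefix of u ++ y
theorem pvNoPrefixApp {k' u : List Char} (y : List Char)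
    (h1 : ¬ k' <+: u) (h2 : ¬ u <+: k') : ¬ k' <+: u ++ y := by
  intro h
  rcases le_or_gt k'.length u.length with hle | hlt
  · exact h1 (List.prefix_of_prefix_length_le h (u.prefix_append y) hle)
  · exact h2 (List.prefix_of_prefix_length_le (u.prefix_append y) h (le_of_lt hlt))
-- SPLIT: if no k-occurrence starts inside u, replace passes over u untouched
theorem pvRepl_split (k v : List Char) :
    ∀ (u x : List Char), (∀ p, p < u.length → ¬ k <+: (u ++ x).drop p) →
      pvRepl k v (u ++ x) = u ++ pvRepl k v x := by
  intro u
  induction u with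
  | nil => intro x _; simp
  | cons c u' ih =>
    intro x hnp
    have h0 : ¬ k <+: (c :: (u' ++ x)) := by simpa using hnp 0 (by simp)
    rw [List.cons_append, pvRepl, if_neg (by
      intro hc
      exact h0 ((List.isPrefixOf_iff_prefix).mp hc.1))]
    have := ih x (fun p hp => by simpa using hnp (p + 1) (by simp; omega))
    rw [this]; simp

-- heads of distinct classes: an all-lowercase word is a prefix of pvRepl k v t iff of t
theorem pvLow_prefix_repl {k v : List Char} (hb : pvBaseOK (k, v) = true) :
    ∀ (t w : List Char), (∀ c ∈ w, pvLow c = true) →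
      (w <+: pvRepl k v t ↔ w <+: t) := by
  intro t
  induction t with
  | nil => intro w _; rw [pvRepl]
  | cons c t' ih =>
    intro w hw
    obtain ⟨a, tk, b, tv, rfl, rfl⟩ : ∃ a tk b tv, k = a :: tk ∧ v = b :: tv := by
      rcases k with _ | ⟨a, tk⟩ <;> rcases v with _ | ⟨b, tv⟩ <;>
        simp [pvBaseOK] at hb ⊢
    have hup : pvUp a = true ∧ pvUp b = true := by
      simp [pvBaseOK] at hb; tauto
    by_cases hp : (a :: tk).isPrefixOf (c :: t') ∧ (a :: tk) ≠ []
    · rw [pvRepl, if_pos hp]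
      cases w with
      | nil => simp
      | cons w0 w' =>
        have hw0 : pvLow w0 = true := hw w0 (by simp)
        have hac : a = c := by
          have := (List.isPrefixOf_iff_prefix).mp hp.1
          exact (List.cons_prefix_cons.mp this).1
        constructor
        · intro hpre
          exact absurd (List.cons_prefix_cons.mp hpre).1.symm (pvUp_ne_low hup.2 hw0)
        · intro hpre
          exact absurd (hac.trans (List.cons_prefix_cons.mp hpre).1.symm)
            (pvUp_ne_low hup.1 hw0)
    · rw [pvRepl, if_neg hp]
      cases w with
      | nil => simp
      | cons w0 w' =>
        rw [List.cons_prefix_cons, List.cons_prefix_cons]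
        have := ih w' (fun c hc => hw c (by simp [hc]))
        rw [this]
def pvFold (ps : List (List Char × List Char)) (s : List Char) : List Char :=
  ps.foldl (fun acc p => pvRepl p.1 p.2 acc) s

theorem pvFold_nil (ps : List (List Char × List Char)) : pvFold ps [] = [] := by
  induction ps with
  | nil => rfl
  | cons q ps ih =>
    show pvFold ps (pvRepl q.1 q.2 []) = []
    rw [pvRepl]; exact ih

theorem pvFold_split (ps : List (List Char × List Char)) (u : List Char)
    (h : ∀ q ∈ ps, ∀ y, pvRepl q.1 q.2 (u ++ y) = u ++ pvRepl q.1 q.2 y) :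
    ∀ x, pvFold ps (u ++ x) = u ++ pvFold ps x := by
  induction ps with
  | nil => intro x; rfl
  | cons q ps ih =>
    intro x
    show pvFold ps (pvRepl q.1 q.2 (u ++ x)) = u ++ pvFold ps (pvRepl q.1 q.2 x)
    rw [h q (by simp) x]
    exact ih (fun q' hq' => h q' (by simp [hq'])) _

-- no key matches at the head: the head character passes through all replaces
theorem pvFold_nomatch (ps : List (List Char × List Char)) (hg : ∀ q ∈ ps, pvBaseOK q = true)
    (c : Char) : ∀ t, (∀ q ∈ ps, ¬ q.1 <+: (c :: t)) →
    pvFold ps (c :: t) = c :: pvFold ps t := by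
  induction ps with
  | nil => intro t _; rfl
  | cons q ps ih =>
    intro t hnm
    have h1 : pvRepl q.1 q.2 (c :: t) = c :: pvRepl q.1 q.2 t := by
      rw [pvRepl, if_neg (by
        intro hc
        exact hnm q (by simp) ((List.isPrefixOf_iff_prefix).mp hc.1))]
    show pvFold ps (pvRepl q.1 q.2 (c :: t)) = c :: pvFold ps (pvRepl q.1 q.2 t)
    rw [h1]
    refine ih (fun r hr => hg r (by simp [hr])) _ ?_
    intro r hr hpre
    obtain ⟨rk, rv⟩ := r
    have hbase := hg (rk, rv) (by simp [hr])
    rcases rk with _ | ⟨a, w⟩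
    · cases rv <;> simp [pvBaseOK] at hbase
    · have hw : ∀ d ∈ w, pvLow d = true := by
        rcases rv with _ | ⟨b, tv⟩
        · simp [pvBaseOK] at hbase
        · simp [pvBaseOK, List.all_eq_true] at hbase; tauto
      simp only at hpre
      rw [List.cons_prefix_cons] at hpre
      have hlow := (pvLow_prefix_repl (hg q (by simp)) t w hw).mp hpre.2
      exact hnm (a :: w, rv) (by simp [hr]) (List.cons_prefix_cons.mpr ⟨hpre.1, hlow⟩)
theorem pvScan_nil (ps : List (List Char × List Char)) : pvScan ps [] = [] := by
  rw [pvScan]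

theorem pvScan_cons_some (ps : List (List Char × List Char)) (c : Char) (t : List Char)
    (q : List Char × List Char)
    (h : ps.find? (fun p => p.1.isPrefixOf (c :: t) && !p.1.isEmpty) = some q) :
    pvScan ps (c :: t) = q.2 ++ pvScan ps ((c :: t).drop q.1.length) := by
  rw [pvScan]
  split
  · rename_i q' hq'
    rw [h] at hq'; cases hq'; rfl
  · rename_i hq'
    rw [h] at hq'; cases hq'

theorem pvScan_cons_none (ps : List (List Char × List Char)) (c : Char) (t : List Char)
    (h : ps.find? (fun p => p.1.isPrefixOf (c :: t) && !p.1.isEmpty) = none) :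
    pvScan ps (c :: t) = c :: pvScan ps t := by
  rw [pvScan]
  split
  · rename_i q' hq'
    rw [h] at hq'; cases hq'
  · rfl

theorem pvRepl_key_split (q₁ q : List Char × List Char)
    (hb1 : pvBaseOK q₁ = true) (hb : pvBaseOK q = true)
    (h1 : ¬ q₁.1 <+: q.1) (h2 : ¬ q.1 <+: q₁.1) :
    ∀ y, pvRepl q₁.1 q₁.2 (q.1 ++ y) = q.1 ++ pvRepl q₁.1 q₁.2 y := by
  intro y
  apply pvRepl_split
  intro p hp hpre
  rcases Nat.eq_zero_or_pos p with hp0 | hp1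
  · subst hp0
    exact pvNoPrefixApp y h1 h2 (by simpa using hpre)
  · rw [List.drop_append_of_le_length (le_of_lt hp)] at hpre
    obtain ⟨k, v⟩ := q
    obtain ⟨k1, v1⟩ := q₁
    simp only at hpre hp h1 h2 ⊢
    rcases k with _ | ⟨a, tk⟩
    · cases v <;> simp [pvBaseOK] at hb
    rcases v with _ | ⟨b, tv⟩
    · simp [pvBaseOK] at hb
    rcases k1 with _ | ⟨a1, tk1⟩
    · cases v1 <;> simp [pvBaseOK] at hb1
    rcases v1 with _ | ⟨b1, tv1⟩
    · simp [pvBaseOK] at hb1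
    rcases hd : (a :: tk).drop p with _ | ⟨d, rest⟩
    · have : (a :: tk).length ≤ p := by
        simpa [List.drop_eq_nil_iff] using hd
      omega
    · have hptk : (a :: tk).drop p = tk.drop (p - 1) := by
        cases p with
        | zero => omega
        | succ m => simp
      have hdtk : d ∈ tk := by
        have hmem : d ∈ tk.drop (p - 1) := by rw [← hptk, hd]; simp
        exact List.drop_subset _ _ hmem
      have hdlow : pvLow d = true := by
        simp [pvBaseOK, List.all_eq_true] at hb
        exact hb.1.2 d hdtk
      have ha1 : pvUp a1 = true := by
        simp [pvBaseOK, List.all_eq_true] at hb1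
        exact hb1.1.1
      rw [hd, List.cons_append, List.cons_prefix_cons] at hpre
      exact pvUp_ne_low ha1 hdlow hpre.1

theorem pvRepl_val_split (q' q : List Char × List Char)
    (hsep : pvSepOK q.1 q.2 q'.1 = true) :
    ∀ y, pvRepl q'.1 q'.2 (q.2 ++ y) = q.2 ++ pvRepl q'.1 q'.2 y := by
  intro y
  apply pvRepl_split
  intro p hp hpre
  rw [List.drop_append_of_le_length (le_of_lt hp)] at hpre
  simp only [pvSepOK, Bool.and_eq_true, List.all_eq_true, List.mem_range] at hsep
  obtain ⟨hpp1, hpp2⟩ := hsep.2 p hp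
  simp only [Bool.not_eq_true'] at hpp1 hpp2
  have n1 : ¬ (q.2.drop p) <+: q'.1 := by rw [← List.isPrefixOf_iff_prefix]; simp [hpp1]
  have n2 : ¬ q'.1 <+: (q.2.drop p) := by rw [← List.isPrefixOf_iff_prefix]; simp [hpp2]
  exact pvNoPrefixApp y n2 n1 hpre

theorem pvRepl_head (q : List Char × List Char) (hb : pvBaseOK q = true) (z : List Char) :
    pvRepl q.1 q.2 (q.1 ++ z) = q.2 ++ pvRepl q.1 q.2 z := by
  obtain ⟨k, v⟩ := q
  simp only at hb ⊢
  rcases k with _ | ⟨a, tk⟩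
  · cases v <;> simp [pvBaseOK] at hb
  rw [List.cons_append, pvRepl, if_pos ?_]
  · congr 1
    rw [← List.cons_append]
    congr 1
    exact List.drop_left
  · constructor
    · exact (List.isPrefixOf_iff_prefix).mpr (by rw [← List.cons_append]; exact List.prefix_append _ _)
    · simp
theorem pvFold_eq_scan (ps : List (List Char × List Char)) (hg : pvGood ps = true) :
    ∀ (n : ℕ) (s : List Char), s.length ≤ n → pvFold ps s = pvScan ps s := by
  intro n
  induction n with
  | zero =>
    intro s hs
    have : s = [] := by cases s <;> simp_all
    subst this
    rw [pvFold_nil, pvScan_nil]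
  | succ n ih =>
    intro s hs
    cases s with
    | nil => rw [pvFold_nil, pvScan_nil]
    | cons c t =>
      have htn : t.length ≤ n := by simpa using hs
      cases hf : ps.find? (fun p => p.1.isPrefixOf (c :: t) && !p.1.isEmpty) with
      | none =>
        rw [pvScan_cons_none ps c t hf, ← ih t htn]
        refine pvFold_nomatch ps (pvGood_base hg) c t ?_
        intro q hq hpre
        have hnp := List.find?_eq_none.mp hf q hq
        have hb := pvGood_base hg q hq
        have hne : q.1 ≠ [] := by
          obtain ⟨k, v⟩ := q
          cases k
          · cases v <;> simp [pvBaseOK] at hb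
          · simp
        simp only [Bool.and_eq_true, Bool.not_eq_eq_eq_not, Bool.not_true,
          List.isEmpty_eq_false_iff, not_and] at hnp
        rw [← List.isPrefixOf_iff_prefix] at hpre
        exact absurd hne (by simpa [hpre] using hnp)
      | some q =>
        obtain ⟨hpred, ps₁, ps₂, hps, hearly⟩ := List.find?_eq_some_iff_append.mp hf
        simp only [Bool.and_eq_true, List.isPrefixOf_iff_prefix] at hpred
        obtain ⟨r, hr⟩ := hpred.1
        have hqmem : q ∈ ps := by rw [hps]; simp
        have hbq : pvBaseOK q = true := pvGood_base hg q hqmem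
        have hq1ne : q.1.length ≠ 0 := by
          simpa [List.length_eq_zero_iff, List.isEmpty_iff] using hpred.2
        rw [pvScan_cons_some ps c t q hf]
        have hdrop : (c :: t).drop q.1.length = r := by
          rw [← hr]; exact List.drop_left
        rw [hdrop]
        have hrlen : r.length ≤ n := by
          have := congrArg List.length hr
          simp at this
          omega
        rw [← ih r hrlen, ← hr]
        have hFapp : ∀ x, pvFold ps x = pvFold ps₂ (pvRepl q.1 q.2 (pvFold ps₁ x)) := by
          intro x
          rw [hps]
          simp [pvFold, List.foldl_append]
        rw [hFapp (q.1 ++ r), hFapp r]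
        have hgood' : pvGood (ps₁ ++ q :: ps₂) = true := by rw [← hps]; exact hg
        have hstepA : pvFold ps₁ (q.1 ++ r) = q.1 ++ pvFold ps₁ r := by
          refine pvFold_split ps₁ q.1 ?_ r
          intro q₁ hq₁ y
          have hsep := pvGood_sep hgood' q₁ hq₁ q (by simp)
          simp only [pvSepOK, Bool.and_eq_true, Bool.not_eq_true'] at hsep
          refine pvRepl_key_split q₁ q (pvGood_base hg q₁ (by rw [hps]; simp [hq₁])) hbq ?_ ?_ y
          · rw [← List.isPrefixOf_iff_prefix]; simp [hsep.1.1]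
          · rw [← List.isPrefixOf_iff_prefix]; simp [hsep.1.2]
        rw [hstepA, pvRepl_head q hbq (pvFold ps₁ r)]
        refine pvFold_split ps₂ q.2 ?_ _
        intro q' hq' y
        have hsep : pvSepOK q.1 q.2 q'.1 = true := by
          have hsuf := pvGood_suffix (l₁ := ps₁) (l₂ := q :: ps₂) hgood'
          simp only [pvGood, Bool.and_eq_true, List.all_eq_true] at hsuf
          exact hsuf.1.2 q' hq'
        exact pvRepl_val_split q' q hsep y
theorem pvGood_pvPairs : pvGood pvPairs = true := by decide

theorem pvFoldl_str (qs : List (String × String)) :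
    ∀ (label : String), (∀ p ∈ qs, p.1.toList ≠ []) →
      (qs.foldl (fun acc p => PySem.Str.replace acc p.1 p.2) label).toList
        = pvFold (qs.map (fun p => (p.1.toList, p.2.toList))) label.toList := by
  induction qs with
  | nil => intro label _; rfl
  | cons q qs ih =>
    intro label hne
    show (qs.foldl (fun acc p => PySem.Str.replace acc p.1 p.2)
        (PySem.Str.replace label q.1 q.2)).toList = _
    rw [ih (PySem.Str.replace label q.1 q.2) (fun p hp => hne p (by simp [hp]))]
    show _ = pvFold (qs.map (fun p => (p.1.toList, p.2.toList)))
      (pvRepl q.1.toList q.2.toList label.toList)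
    rw [PySem.Str.toList_replace, pvReplace_eq _ _ _ (hne q (by simp))]

theorem pvPairs_eq : pvPairs = pyAbbrev.map (fun p => (p.1.toList, p.2.toList)) := by decide

theorem pvCore (label : String) :
    pyAbbrev.foldl (fun acc p => PySem.Str.replace acc p.1 p.2) label
      = String.ofList (pvScan pvPairs label.toList) := by
  have h1 := pvFoldl_str pyAbbrev label (by decide)
  rw [← pvPairs_eq] at h1
  rw [pvFold_eq_scan pvPairs pvGood_pvPairs label.toList.length label.toList le_rfl] at h1
  calc pyAbbrev.foldl (fun acc p => PySem.Str.replace acc p.1 p.2) label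
      = String.ofList (pyAbbrev.foldl (fun acc p => PySem.Str.replace acc p.1 p.2) label).toList :=
        String.ofList_toList.symm
    _ = String.ofList (pvScan pvPairs label.toList) := by rw [h1]

-- ===== VERDICT (by name: the statement is the Claim_ definition above) =====
theorem shorten_label_spec : Claim_equal_shorten_label := by
  intro label _
  unfold Spec_shorten_label shorten_label shorten_label_alt
  rw [pvCore label]
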